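-- pv_equiv track=rewrite | github.com/adibl/corsera_algoritems | my_solutions/1-algorithmic-toolbox/3-greedy-algorithms/signatures.py | signitures
-- ===== SOURCE A (Python) =====
-- def signitures(arr):
--     if len(arr) < 2:
--         return [x[2] for x in arr]
--     line = arr.pop()
--     line2 = arr.pop()
--     start_change = line[0] - line2[0]
--     if (start_change < 0 and line[1] >= -1 * start_change) or (start_change > 0 and line2[1] >= start_change) or start_change == 0:
--             start = max(line[0], line2[0])
--             end = min(line[2], line2[2])
--             arr.append([start, end - start, end])
--             x = signitures(arr)
--             return x
--
--     else:
--         arr.append(line2)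
--         x = signitures(arr)
--         x.append(line[2])
--         return x
-- ===== SOURCE B (Python) =====
-- def signitures(arr):
--     # Single left fold over the reversed list with a (current, emitted) state
--     # instead of recursion on a mutated stack; does not mutate arr.
--     cur = None
--     out = []
--     for e in reversed(arr):
--         if cur is None:
--             cur = e
--             continue
--         sc = cur[0] - e[0]
--         if (sc < 0 and cur[1] >= -sc) or (sc > 0 and e[1] >= sc) or sc == 0:
--             s = max(cur[0], e[0])
--             t = min(cur[2], e[2])
--             cur = [s, t - s, t]
--         else:
--             out.append(cur[2])
--             cur = e
--     return ([cur[2]] if cur is not None else []) + out[::-1]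
-- ===== Notes on version B (the rewrite author's own statement) =====
-- stated objective: alternative
-- what changed: Replaces A's recursion on a mutated stack (with post-recursion appends) by a single left fold over the reversed list carrying a (current interval, emitted ends) state, reversing the emitted list once at the end; B also does not mutate the caller's list.
import Mathlib
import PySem

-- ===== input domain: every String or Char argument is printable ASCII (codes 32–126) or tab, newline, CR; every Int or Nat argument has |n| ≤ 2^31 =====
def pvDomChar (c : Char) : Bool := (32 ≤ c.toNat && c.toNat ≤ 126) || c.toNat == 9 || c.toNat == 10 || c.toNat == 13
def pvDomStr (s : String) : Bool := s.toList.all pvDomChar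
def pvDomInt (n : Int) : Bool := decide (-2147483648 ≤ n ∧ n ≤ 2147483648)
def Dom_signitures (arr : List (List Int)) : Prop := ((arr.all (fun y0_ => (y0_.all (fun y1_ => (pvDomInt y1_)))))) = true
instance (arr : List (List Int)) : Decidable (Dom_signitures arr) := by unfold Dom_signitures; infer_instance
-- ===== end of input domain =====

-- B replaces A's recursion on a mutated stack by one left fold over the reversed list with a
-- (current interval, emitted ends) state (alternative decomposition, same cost). Equivalence is
-- about the RETURN value only: Python A pops arr empty in place, B leaves the caller's list alone.


-- Pythonic indexing l[i]; on Pre_ every inner list has length ≥ 3, so the default is never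
-- taken (outside Pre_ Python raises IndexError).
def pvF (l : List Int) (i : Nat) : Int := (PySem.List.pyGet? l i).getD 0

-- ===== PORT A =====
-- A pops from the END of arr; the port passes arr.reverse to the recursive core, whose head
-- is Python's stack top. For fewer than 2 elements reverse is identity, so the base case
-- [x[2] for x in arr] is the map over the core's list itself.
def signituresA : List (List Int) → List Int
  | [] => []
  | [l] => [pvF l 2]
  | line :: line2 :: rest =>
      let start_change := pvF line 0 - pvF line2 0
      if (start_change < 0 ∧ pvF line 1 ≥ -1 * start_change) ∨
         (start_change > 0 ∧ pvF line2 1 ≥ start_change) ∨ start_change = 0 then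
        let start := max (pvF line 0) (pvF line2 0)
        let e := min (pvF line 2) (pvF line2 2)
        signituresA ([start, e - start, e] :: rest)
      else
        signituresA (line2 :: rest) ++ [pvF line 2]
termination_by l => l.length

def signitures (arr : List (List Int)) : List Int := signituresA arr.reverse

-- ===== PORT B =====
-- Source B's for-loop over reversed(arr) as a List.foldl with state (cur : Option, out : List);
-- out.append v = out ++ [v]; the return line builds [cur[2]] (if any) ++ out[::-1].
def sigStep (st : Option (List Int) × List Int) (e : List Int) : Option (List Int) × List Int :=
  match st with
  | (none, out) => (some e, out)
  | (some cur, out) =>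
      let sc := pvF cur 0 - pvF e 0
      if (sc < 0 ∧ pvF cur 1 ≥ -sc) ∨ (sc > 0 ∧ pvF e 1 ≥ sc) ∨ sc = 0 then
        let s := max (pvF cur 0) (pvF e 0)
        let t := min (pvF cur 2) (pvF e 2)
        (some [s, t - s, t], out)
      else
        (some e, out ++ [pvF cur 2])

def signitures_alt (arr : List (List Int)) : List Int :=
  let st := arr.reverse.foldl sigStep (none, [])
  (match st.1 with
   | none => []
   | some cur => [pvF cur 2]) ++ st.2.reverse

-- ===== PRECONDITION & SPEC =====
-- Pre_ excludes exactly the inputs on which Python A raises IndexError: some inner list has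
-- fewer than 3 entries (x[2]/x[1]/x[0] out of range). B raises there too.
def Pre_signitures (arr : List (List Int)) : Prop := ∀ l ∈ arr, 3 ≤ l.length
instance (arr : List (List Int)) : Decidable (Pre_signitures arr) := by unfold Pre_signitures; infer_instance
def pvWitness_signitures : List (List Int) := [[0, 2, 2], [1, 3, 4], [10, 1, 11]]

def Spec_signitures (arr : List (List Int)) (out : List Int) : Prop := out = signitures_alt arr
instance (arr : List (List Int)) (out : List Int) : Decidable (Spec_signitures arr out) := by unfold Spec_signitures; infer_instance

-- ===== CLAIM =====
def Claim_equal_signitures : Prop := ∀ (arr : List (List Int)), Dom_signitures arr → Pre_signitures arr → Spec_signitures arr (signitures arr)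

-- ===== LEMMAS AND PROOFS =====
-- Fold invariant: from state (some cur, out), the finished fold equals A's recursion on
-- (cur :: rest) followed by out reversed.
theorem sigFold_eq (rest : List (List Int)) (cur : List Int) (out : List Int) :
    ((match (rest.foldl sigStep (some cur, out)).1 with
      | none => ([] : List Int)
      | some c => [pvF c 2]) ++ (rest.foldl sigStep (some cur, out)).2.reverse)
    = signituresA (cur :: rest) ++ out.reverse := by
  induction rest generalizing cur out with
  | nil => simp [signituresA]
  | cons e rest ih =>
    rw [List.foldl_cons]
    rw [show signituresA (cur :: e :: rest)
        = (let start_change := pvF cur 0 - pvF e 0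
           if (start_change < 0 ∧ pvF cur 1 ≥ -1 * start_change) ∨
              (start_change > 0 ∧ pvF e 1 ≥ start_change) ∨ start_change = 0 then
             signituresA ([max (pvF cur 0) (pvF e 0),
               min (pvF cur 2) (pvF e 2) - max (pvF cur 0) (pvF e 0),
               min (pvF cur 2) (pvF e 2)] :: rest)
           else signituresA (e :: rest) ++ [pvF cur 2]) from by
      rw [signituresA]]
    simp only [sigStep, neg_one_mul]
    split_ifs with h
    · exact ih _ _
    · rw [ih]; simp

-- ===== VERDICT =====
theorem signitures_spec : Claim_equal_signitures := by
  intro arr _ _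
  unfold Spec_signitures signitures signitures_alt
  cases h : arr.reverse with
  | nil => simp [signituresA]
  | cons hd tl =>
    rw [List.foldl_cons]
    show _ = _
    have := sigFold_eq tl hd []
    simpa [sigStep] using this.symm
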